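-- pv_equiv track=rewrite | github.com/jiminxchris/streamlit-lecture-project | pages/27_자동차과 진로 탐색.py | calculate_job_scores
-- ===== SOURCE A (Python) =====
-- JOB_WEIGHTS = {
--     '자동차 정비': {'A': 1, 'B': 0, 'C': 1, 'D': 1, 'E': 3, 'F': 3},
--     '자동차 차체수리': {'A': 0, 'B': 2, 'C': 0, 'D': 0, 'E': 3, 'F': 1},
--     '자동차 도장': {'A': 0, 'B': 3, 'C': 0, 'D': 0, 'E': 1, 'F': 0},
--     '자동차 튜닝': {'A': 3, 'B': 2, 'C': 2, 'D': 0, 'E': 0, 'F': 0},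
--     '서비스 어드바이저 (SA)': {'A': 1, 'B': 1, 'C': 3, 'D': 2, 'E': 1, 'F': 0},
--     '자동차 딜러 (영업)': {'A': 3, 'B': 2, 'C': 2, 'D': 1, 'E': 0, 'F': 0}
-- }
--
-- def calculate_job_scores(factors):
--     """1단계 선호 동인을 기반으로 직무 추천 점수 계산"""
--     scores = {job: 0 for job in JOB_WEIGHTS}
--
--     factor_keys = factors if isinstance(factors, list) else []
--
--     for factor in factor_keys:
--         for job, weights in JOB_WEIGHTS.items():
--             scores[job] += weights.get(factor, 0)
--
--     sorted_jobs = sorted(scores.items(), key=lambda item: item[1], reverse=True)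
--     return sorted_jobs
-- ===== SOURCE B (Python) =====
-- JOB_WEIGHTS = {
--     '자동차 정비': {'A': 1, 'B': 0, 'C': 1, 'D': 1, 'E': 3, 'F': 3},
--     '자동차 차체수리': {'A': 0, 'B': 2, 'C': 0, 'D': 0, 'E': 3, 'F': 1},
--     '자동차 도장': {'A': 0, 'B': 3, 'C': 0, 'D': 0, 'E': 1, 'F': 0},
--     '자동차 튜닝': {'A': 3, 'B': 2, 'C': 2, 'D': 0, 'E': 0, 'F': 0},
--     '서비스 어드바이저 (SA)': {'A': 1, 'B': 1, 'C': 3, 'D': 2, 'E': 1, 'F': 0},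
--     '자동차 딜러 (영업)': {'A': 3, 'B': 2, 'C': 2, 'D': 1, 'E': 0, 'F': 0}
-- }
--
-- def calculate_job_scores(factors):
--     """Closed-form version: only the six factor letters A-F carry weight, so
--     count each letter once with list.count and write every job's score as a
--     literal linear combination of those six counts; no dict accumulation."""
--     if isinstance(factors, list):
--         a, b, c, d, e, f = (factors.count(k) for k in 'ABCDEF')
--     else:
--         a = b = c = d = e = f = 0
--     scores = [
--         ('자동차 정비', a + c + d + 3*e + 3*f),
--         ('자동차 차체수리', 2*b + 3*e + f),
--         ('자동차 도장', 3*b + e),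
--         ('자동차 튜닝', 3*a + 2*b + 2*c),
--         ('서비스 어드바이저 (SA)', a + b + 3*c + 2*d + e),
--         ('자동차 딜러 (영업)', 3*a + 2*b + 2*c + d),
--     ]
--     return sorted(scores, key=lambda kv: kv[1], reverse=True)
-- ===== Notes on version B (the rewrite author's own statement) =====
-- stated objective: faster
-- what changed: A accumulates into a scores dict with a nested loop over jobs for every factor occurrence; B has no weight table or dict at all: it counts the six meaningful letters A-F once with list.count and writes each job's score as a literal linear combination of those counts, then sorts the same way.
import Mathlib
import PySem

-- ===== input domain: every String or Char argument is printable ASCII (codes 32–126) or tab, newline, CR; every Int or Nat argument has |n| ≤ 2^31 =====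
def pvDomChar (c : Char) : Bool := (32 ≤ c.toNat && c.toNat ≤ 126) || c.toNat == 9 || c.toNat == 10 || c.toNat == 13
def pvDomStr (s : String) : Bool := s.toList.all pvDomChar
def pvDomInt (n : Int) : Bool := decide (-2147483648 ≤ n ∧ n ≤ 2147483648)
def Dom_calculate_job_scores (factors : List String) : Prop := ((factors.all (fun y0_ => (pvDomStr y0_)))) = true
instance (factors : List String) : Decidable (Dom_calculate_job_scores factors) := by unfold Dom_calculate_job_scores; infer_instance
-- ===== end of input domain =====

-- B drops A's weight-table/dict accumulation entirely: only the six letters A–F carry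
-- weight, so B counts each letter once and writes every job's score as a literal linear
-- combination of the six counts, then sorts the same way (objective: faster — one counting
-- pass instead of a per-occurrence pass over all six jobs; same return value).

-- JOB_WEIGHTS, module constant of A
def pvJW : List (String × PySem.Dict String Int) :=
  [("자동차 정비", PySem.Dict.ofList [("A",1),("B",0),("C",1),("D",1),("E",3),("F",3)]),
   ("자동차 차체수리", PySem.Dict.ofList [("A",0),("B",2),("C",0),("D",0),("E",3),("F",1)]),
   ("자동차 도장", PySem.Dict.ofList [("A",0),("B",3),("C",0),("D",0),("E",1),("F",0)]),
   ("자동차 튜닝", PySem.Dict.ofList [("A",3),("B",2),("C",2),("D",0),("E",0),("F",0)]),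
   ("서비스 어드바이저 (SA)", PySem.Dict.ofList [("A",1),("B",1),("C",3),("D",2),("E",1),("F",0)]),
   ("자동차 딜러 (영업)", PySem.Dict.ofList [("A",3),("B",2),("C",2),("D",1),("E",0),("F",0)])]

-- ===== PORT A =====
-- (isinstance(factors, list) is always true under the type convention, so factor_keys = factors)
def calculate_job_scores (factors : List String) : List (String × Int) :=
  let scores : PySem.Dict String Int := pvJW.foldl (fun d p => d.insert p.1 0) PySem.Dict.empty
  let factor_keys := factors
  let scores := factor_keys.foldl (fun d factor =>
      pvJW.foldl (fun d p => d.modify p.1 0 (fun v => v + p.2.getD factor 0)) d) scores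
  PySem.List.sorted scores.items (fun item => item.2) true

-- ===== PORT B =====
def calculate_job_scores_alt (factors : List String) : List (String × Int) :=
  let a : Int := PySem.List.count factors "A"
  let b : Int := PySem.List.count factors "B"
  let c : Int := PySem.List.count factors "C"
  let d : Int := PySem.List.count factors "D"
  let e : Int := PySem.List.count factors "E"
  let f : Int := PySem.List.count factors "F"
  let scores : List (String × Int) :=
    [("자동차 정비", a + c + d + 3*e + 3*f),
     ("자동차 차체수리", 2*b + 3*e + f),
     ("자동차 도장", 3*b + e),
     ("자동차 튜닝", 3*a + 2*b + 2*c),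
     ("서비스 어드바이저 (SA)", a + b + 3*c + 2*d + e),
     ("자동차 딜러 (영업)", 3*a + 2*b + 2*c + d)]
  PySem.List.sorted scores (fun kv => kv.2) true

-- ===== PRECONDITION & SPEC =====
def Spec_calculate_job_scores (factors : List String) (out : List (String × Int)) : Prop := out = calculate_job_scores_alt factors
instance (factors : List String) (out : List (String × Int)) : Decidable (Spec_calculate_job_scores factors out) := by unfold Spec_calculate_job_scores; infer_instance

-- ===== CLAIM (what is proved, stated in full; the proofs are below) =====
def Claim_equal_calculate_job_scores : Prop := ∀ (factors : List String), Dom_calculate_job_scores factors → Spec_calculate_job_scores factors (calculate_job_scores factors)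

-- ===== LEMMAS AND PROOFS =====

-- per-job weight lookup as a plain function
def pvG (k : Nat) (f : String) : Int := ((pvJW.getD k ("", PySem.Dict.empty)).2).getD f 0

-- one pass of A's inner loop over a six-entry literal dict
theorem pv_inner_eval (f : String) (v1 v2 v3 v4 v5 v6 : Int) :
    pvJW.foldl (fun d p => d.modify p.1 0 (fun v => v + p.2.getD f 0))
      (PySem.Dict.mk [("자동차 정비", v1), ("자동차 차체수리", v2), ("자동차 도장", v3),
        ("자동차 튜닝", v4), ("서비스 어드바이저 (SA)", v5), ("자동차 딜러 (영업)", v6)])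
    = PySem.Dict.mk [("자동차 정비", v1 + pvG 0 f), ("자동차 차체수리", v2 + pvG 1 f),
        ("자동차 도장", v3 + pvG 2 f), ("자동차 튜닝", v4 + pvG 3 f),
        ("서비스 어드바이저 (SA)", v5 + pvG 4 f), ("자동차 딜러 (영업)", v6 + pvG 5 f)] := by
  simp [pvJW, pvG, List.foldl, PySem.Dict.modify, PySem.Dict.insert, PySem.Dict.getD,
    PySem.Dict.get?, PySem.Dict.contains]

-- A's whole accumulation loop, with the running totals generalized
theorem pv_outer_eval (factors : List String) (v1 v2 v3 v4 v5 v6 : Int) :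
    factors.foldl (fun d factor =>
        pvJW.foldl (fun d p => d.modify p.1 0 (fun v => v + p.2.getD factor 0)) d)
      (PySem.Dict.mk [("자동차 정비", v1), ("자동차 차체수리", v2), ("자동차 도장", v3),
        ("자동차 튜닝", v4), ("서비스 어드바이저 (SA)", v5), ("자동차 딜러 (영업)", v6)])
    = PySem.Dict.mk [("자동차 정비", v1 + (factors.map (pvG 0)).sum),
        ("자동차 차체수리", v2 + (factors.map (pvG 1)).sum),
        ("자동차 도장", v3 + (factors.map (pvG 2)).sum),
        ("자동차 튜닝", v4 + (factors.map (pvG 3)).sum),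
        ("서비스 어드바이저 (SA)", v5 + (factors.map (pvG 4)).sum),
        ("자동차 딜러 (영업)", v6 + (factors.map (pvG 5)).sum)] := by
  induction factors generalizing v1 v2 v3 v4 v5 v6 with
  | nil => simp
  | cons f fs ih =>
      rw [List.foldl_cons, pv_inner_eval, ih]
      simp [add_assoc]

-- summing a function supported on the six letters = linear combination of their counts
theorem pv_sum_counts (wa wb wc wd we wf : Int) (g : String → Int)
    (hg : ∀ s, g s = if s = "A" then wa else if s = "B" then wb else if s = "C" then wc
        else if s = "D" then wd else if s = "E" then we else if s = "F" then wf else 0)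
    (xs : List String) :
    (xs.map g).sum = wa * (xs.count "A" : Int) + wb * (xs.count "B" : Int)
      + wc * (xs.count "C" : Int) + wd * (xs.count "D" : Int)
      + we * (xs.count "E" : Int) + wf * (xs.count "F" : Int) := by
  induction xs with
  | nil => simp
  | cons x xs ih =>
      rw [List.map_cons, List.sum_cons, ih, hg x]
      by_cases h1 : x = "A"
      · subst h1; simp only [List.count_cons]; norm_num; ring
      by_cases h2 : x = "B"
      · subst h2; simp only [List.count_cons]; norm_num [h1]; ring
      by_cases h3 : x = "C"
      · subst h3; simp only [List.count_cons]; norm_num [h1, h2]; ring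
      by_cases h4 : x = "D"
      · subst h4; simp only [List.count_cons]; norm_num [h1, h2, h3]; ring
      by_cases h5 : x = "E"
      · subst h5; simp only [List.count_cons]; norm_num [h1, h2, h3, h4]; ring
      by_cases h6 : x = "F"
      · subst h6; simp only [List.count_cons]; norm_num [h1, h2, h3, h4, h5]; ring
      · simp only [List.count_cons]
        norm_num [h1, h2, h3, h4, h5, h6, Ne.symm h1, Ne.symm h2, Ne.symm h3,
          Ne.symm h4, Ne.symm h5, Ne.symm h6]

-- closed evaluation of job 0's weight lookup
theorem pvG0_eval (s : String) : pvG 0 s = (if s = "A" then 1 else if s = "B" then 0 else if s = "C" then 1 else if s = "D" then 1 else if s = "E" then 3 else if s = "F" then 3 else 0) := by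
  by_cases hA : s = "A"
  · subst hA; decide
  by_cases hB : s = "B"
  · subst hB; decide
  by_cases hC : s = "C"
  · subst hC; decide
  by_cases hD : s = "D"
  · subst hD; decide
  by_cases hE : s = "E"
  · subst hE; decide
  by_cases hF : s = "F"
  · subst hF; decide
  simp [pvG, pvJW, PySem.Dict.getD, PySem.Dict.get?, PySem.Dict.ofList, PySem.Dict.insert,
    PySem.Dict.empty, PySem.Dict.contains, PySem.Dict.update, List.find?, hA, hB, hC, hD, hE, hF,
    Ne.symm hA, Ne.symm hB, Ne.symm hC, Ne.symm hD, Ne.symm hE, Ne.symm hF,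
    beq_eq_false_iff_ne.mpr (Ne.symm hA), beq_eq_false_iff_ne.mpr (Ne.symm hB),
    beq_eq_false_iff_ne.mpr (Ne.symm hC), beq_eq_false_iff_ne.mpr (Ne.symm hD),
    beq_eq_false_iff_ne.mpr (Ne.symm hE), beq_eq_false_iff_ne.mpr (Ne.symm hF)]

-- closed evaluation of job 1's weight lookup
theorem pvG1_eval (s : String) : pvG 1 s = (if s = "A" then 0 else if s = "B" then 2 else if s = "C" then 0 else if s = "D" then 0 else if s = "E" then 3 else if s = "F" then 1 else 0) := by
  by_cases hA : s = "A"
  · subst hA; decide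
  by_cases hB : s = "B"
  · subst hB; decide
  by_cases hC : s = "C"
  · subst hC; decide
  by_cases hD : s = "D"
  · subst hD; decide
  by_cases hE : s = "E"
  · subst hE; decide
  by_cases hF : s = "F"
  · subst hF; decide
  simp [pvG, pvJW, PySem.Dict.getD, PySem.Dict.get?, PySem.Dict.ofList, PySem.Dict.insert,
    PySem.Dict.empty, PySem.Dict.contains, PySem.Dict.update, List.find?, hA, hB, hC, hD, hE, hF,
    Ne.symm hA, Ne.symm hB, Ne.symm hC, Ne.symm hD, Ne.symm hE, Ne.symm hF,
    beq_eq_false_iff_ne.mpr (Ne.symm hA), beq_eq_false_iff_ne.mpr (Ne.symm hB),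
    beq_eq_false_iff_ne.mpr (Ne.symm hC), beq_eq_false_iff_ne.mpr (Ne.symm hD),
    beq_eq_false_iff_ne.mpr (Ne.symm hE), beq_eq_false_iff_ne.mpr (Ne.symm hF)]

-- closed evaluation of job 2's weight lookup
theorem pvG2_eval (s : String) : pvG 2 s = (if s = "A" then 0 else if s = "B" then 3 else if s = "C" then 0 else if s = "D" then 0 else if s = "E" then 1 else if s = "F" then 0 else 0) := by
  by_cases hA : s = "A"
  · subst hA; decide
  by_cases hB : s = "B"
  · subst hB; decide
  by_cases hC : s = "C"
  · subst hC; decide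
  by_cases hD : s = "D"
  · subst hD; decide
  by_cases hE : s = "E"
  · subst hE; decide
  by_cases hF : s = "F"
  · subst hF; decide
  simp [pvG, pvJW, PySem.Dict.getD, PySem.Dict.get?, PySem.Dict.ofList, PySem.Dict.insert,
    PySem.Dict.empty, PySem.Dict.contains, PySem.Dict.update, List.find?, hA, hB, hC, hD, hE, hF,
    Ne.symm hA, Ne.symm hB, Ne.symm hC, Ne.symm hD, Ne.symm hE, Ne.symm hF,
    beq_eq_false_iff_ne.mpr (Ne.symm hA), beq_eq_false_iff_ne.mpr (Ne.symm hB),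
    beq_eq_false_iff_ne.mpr (Ne.symm hC), beq_eq_false_iff_ne.mpr (Ne.symm hD),
    beq_eq_false_iff_ne.mpr (Ne.symm hE), beq_eq_false_iff_ne.mpr (Ne.symm hF)]

-- closed evaluation of job 3's weight lookup
theorem pvG3_eval (s : String) : pvG 3 s = (if s = "A" then 3 else if s = "B" then 2 else if s = "C" then 2 else if s = "D" then 0 else if s = "E" then 0 else if s = "F" then 0 else 0) := by
  by_cases hA : s = "A"
  · subst hA; decide
  by_cases hB : s = "B"
  · subst hB; decide
  by_cases hC : s = "C"
  · subst hC; decide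
  by_cases hD : s = "D"
  · subst hD; decide
  by_cases hE : s = "E"
  · subst hE; decide
  by_cases hF : s = "F"
  · subst hF; decide
  simp [pvG, pvJW, PySem.Dict.getD, PySem.Dict.get?, PySem.Dict.ofList, PySem.Dict.insert,
    PySem.Dict.empty, PySem.Dict.contains, PySem.Dict.update, List.find?, hA, hB, hC, hD, hE, hF,
    Ne.symm hA, Ne.symm hB, Ne.symm hC, Ne.symm hD, Ne.symm hE, Ne.symm hF,
    beq_eq_false_iff_ne.mpr (Ne.symm hA), beq_eq_false_iff_ne.mpr (Ne.symm hB),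
    beq_eq_false_iff_ne.mpr (Ne.symm hC), beq_eq_false_iff_ne.mpr (Ne.symm hD),
    beq_eq_false_iff_ne.mpr (Ne.symm hE), beq_eq_false_iff_ne.mpr (Ne.symm hF)]

-- closed evaluation of job 4's weight lookup
theorem pvG4_eval (s : String) : pvG 4 s = (if s = "A" then 1 else if s = "B" then 1 else if s = "C" then 3 else if s = "D" then 2 else if s = "E" then 1 else if s = "F" then 0 else 0) := by
  by_cases hA : s = "A"
  · subst hA; decide
  by_cases hB : s = "B"
  · subst hB; decide
  by_cases hC : s = "C"
  · subst hC; decide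
  by_cases hD : s = "D"
  · subst hD; decide
  by_cases hE : s = "E"
  · subst hE; decide
  by_cases hF : s = "F"
  · subst hF; decide
  simp [pvG, pvJW, PySem.Dict.getD, PySem.Dict.get?, PySem.Dict.ofList, PySem.Dict.insert,
    PySem.Dict.empty, PySem.Dict.contains, PySem.Dict.update, List.find?, hA, hB, hC, hD, hE, hF,
    Ne.symm hA, Ne.symm hB, Ne.symm hC, Ne.symm hD, Ne.symm hE, Ne.symm hF,
    beq_eq_false_iff_ne.mpr (Ne.symm hA), beq_eq_false_iff_ne.mpr (Ne.symm hB),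
    beq_eq_false_iff_ne.mpr (Ne.symm hC), beq_eq_false_iff_ne.mpr (Ne.symm hD),
    beq_eq_false_iff_ne.mpr (Ne.symm hE), beq_eq_false_iff_ne.mpr (Ne.symm hF)]

-- closed evaluation of job 5's weight lookup
theorem pvG5_eval (s : String) : pvG 5 s = (if s = "A" then 3 else if s = "B" then 2 else if s = "C" then 2 else if s = "D" then 1 else if s = "E" then 0 else if s = "F" then 0 else 0) := by
  by_cases hA : s = "A"
  · subst hA; decide
  by_cases hB : s = "B"
  · subst hB; decide
  by_cases hC : s = "C"
  · subst hC; decide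
  by_cases hD : s = "D"
  · subst hD; decide
  by_cases hE : s = "E"
  · subst hE; decide
  by_cases hF : s = "F"
  · subst hF; decide
  simp [pvG, pvJW, PySem.Dict.getD, PySem.Dict.get?, PySem.Dict.ofList, PySem.Dict.insert,
    PySem.Dict.empty, PySem.Dict.contains, PySem.Dict.update, List.find?, hA, hB, hC, hD, hE, hF,
    Ne.symm hA, Ne.symm hB, Ne.symm hC, Ne.symm hD, Ne.symm hE, Ne.symm hF,
    beq_eq_false_iff_ne.mpr (Ne.symm hA), beq_eq_false_iff_ne.mpr (Ne.symm hB),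
    beq_eq_false_iff_ne.mpr (Ne.symm hC), beq_eq_false_iff_ne.mpr (Ne.symm hD),
    beq_eq_false_iff_ne.mpr (Ne.symm hE), beq_eq_false_iff_ne.mpr (Ne.symm hF)]

-- ===== VERDICT (by name: the statement is the Claim_ definition above) =====
set_option maxHeartbeats 1000000 in
theorem calculate_job_scores_spec : Claim_equal_calculate_job_scores := by
  intro factors _
  unfold Spec_calculate_job_scores calculate_job_scores calculate_job_scores_alt
  have h0 : pvJW.foldl (fun d p => d.insert p.1 0)
        (PySem.Dict.empty : PySem.Dict String Int)
      = PySem.Dict.mk [("자동차 정비", (0:Int)), ("자동차 차체수리", 0), ("자동차 도장", 0),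
          ("자동차 튜닝", 0), ("서비스 어드바이저 (SA)", 0), ("자동차 딜러 (영업)", 0)] := by
    decide
  dsimp only
  rw [h0, pv_outer_eval,
      pv_sum_counts 1 0 1 1 3 3 (pvG 0) pvG0_eval factors,
      pv_sum_counts 0 2 0 0 3 1 (pvG 1) pvG1_eval factors,
      pv_sum_counts 0 3 0 0 1 0 (pvG 2) pvG2_eval factors,
      pv_sum_counts 3 2 2 0 0 0 (pvG 3) pvG3_eval factors,
      pv_sum_counts 1 1 3 2 1 0 (pvG 4) pvG4_eval factors,
      pv_sum_counts 3 2 2 1 0 0 (pvG 5) pvG5_eval factors]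
  simp [PySem.List.count_eq]
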